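-- pv_equiv track=rewrite | github.com/db-Lee/iclr2026-5078 | multigenprm/data/preprocess_noisy_data.py | normalize_process_labels
-- ===== SOURCE A (Python) =====
-- def normalize_process_labels(labels):
--     if not labels:
--         return []
--     normalized = labels.copy()
--     first_error_pos = next((i for i, label in enumerate(labels) if label == -1), len(labels))
--     for i in range(first_error_pos):
--         normalized[i] = 1
--     for i in range(first_error_pos, len(normalized)):
--         normalized[i] = -1
--     return normalized
-- ===== SOURCE B (Python) =====
-- def normalize_process_labels(labels):
--     result = []
--     error_seen = False
--     for label in labels:
--         if error_seen or label == -1: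
--             error_seen = True
--             result.append(-1)
--         else:
--             result.append(1)
--     return result
-- ===== Notes on version B (the rewrite author's own statement) =====
-- stated objective: simpler
-- what changed: Replaces A's copy + first-(-1)-index search + two index-range in-place fills by one forward scan that carries a boolean error_seen flag and appends 1 or -1 to a fresh list; no index is ever computed and the input is not copied.
import Mathlib
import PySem

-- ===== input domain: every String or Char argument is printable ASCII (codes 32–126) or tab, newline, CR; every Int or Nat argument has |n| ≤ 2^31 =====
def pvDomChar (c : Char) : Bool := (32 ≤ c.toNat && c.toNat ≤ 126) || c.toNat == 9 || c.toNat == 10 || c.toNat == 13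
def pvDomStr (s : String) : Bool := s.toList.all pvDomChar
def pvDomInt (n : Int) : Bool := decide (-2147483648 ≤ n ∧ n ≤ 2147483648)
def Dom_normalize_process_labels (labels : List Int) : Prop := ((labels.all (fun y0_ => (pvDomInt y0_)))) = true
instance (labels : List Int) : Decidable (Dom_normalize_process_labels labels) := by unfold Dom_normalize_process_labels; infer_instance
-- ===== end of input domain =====

-- B replaces A's first-(-1)-index search plus two index-range fills by a single
-- forward scan carrying an error_seen flag (objective: simpler).

-- ===== PORT A =====
def normalize_process_labels (labels : List Int) : List Int :=
  if labels = [] then []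
  else
    let normalized := labels
    let first_error_pos : Int :=
      (((PySem.List.enumerate labels 0).findSome?
          (fun p => if p.2 = -1 then some p.1 else none)).getD (labels.length : Int))
    let normalized := (PySem.List.pyRange 0 first_error_pos 1).foldl
        (fun acc i => acc.set i.toNat 1) normalized
    let normalized := (PySem.List.pyRange first_error_pos (normalized.length : Int) 1).foldl
        (fun acc i => acc.set i.toNat (-1)) normalized
    normalized

-- ===== PORT B =====
-- B's loop with (error_seen, result) state, as a foldl over the labels.
def normalize_process_labels_alt (labels : List Int) : List Int :=
  (labels.foldl
    (fun (st : Bool × List Int) label =>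
      if st.1 || label = -1 then (true, st.2 ++ [-1]) else (st.1, st.2 ++ [1]))
    (false, [])).2

-- ===== PRECONDITION & SPEC =====
def Spec_normalize_process_labels (labels : List Int) (out : List Int) : Prop := out = normalize_process_labels_alt labels
instance (labels : List Int) (out : List Int) : Decidable (Spec_normalize_process_labels labels out) := by unfold Spec_normalize_process_labels; infer_instance

-- ===== CLAIM (what is proved, stated in full; the proofs are below) =====
def Claim_equal_normalize_process_labels : Prop := ∀ (labels : List Int), Dom_normalize_process_labels labels → Spec_normalize_process_labels labels (normalize_process_labels labels)

-- ===== LEMMAS AND PROOFS =====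

-- Python's next((i for i, l in enumerate(labels) if l == -1), len(labels)) is findIdx.
theorem firstpos_eq_findIdx (labels : List Int) : ∀ (s : Int),
    (((PySem.List.enumerate labels s).findSome?
        (fun p => if p.2 = -1 then some p.1 else none)).getD (s + labels.length))
      = s + (labels.findIdx (fun l => l == -1) : Int) := by
  induction labels with
  | nil => intro s; simp [PySem.List.enumerate_nil]
  | cons l ls ih =>
    intro s
    rw [PySem.List.enumerate_cons]
    by_cases h : l = -1
    · simp [List.findIdx_cons, h]
    · have := ih (s + 1)
      simp only [List.findSome?_cons, List.findIdx_cons, h]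
      simp only [if_false]
      rw [show s + ((l :: ls).length : Int) = (s + 1) + (ls.length : Int) by
        simp; omega]
      rw [this]
      have hb : (l == -1) = false := by simp [h]
      rw [hb]
      simp only [cond_false]
      push_cast
      ring

theorem fill_length (v : Int) : ∀ (l : List Int) (xs : List Int),
    (l.foldl (fun acc i => acc.set i.toNat v) xs).length = xs.length := by
  intro l
  induction l with
  | nil => intro xs; rfl
  | cons a t ih => intro xs; simp [List.foldl_cons, ih, List.length_set]

theorem fill_getElem? (v : Int) : ∀ (n : Nat) (a b : Int) (xs : List Int) (j : Nat),
    0 ≤ a → (b - a).toNat = n →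
    ((PySem.List.pyRange a b 1).foldl (fun acc i => acc.set i.toNat v) xs)[j]? =
      if a ≤ (j : Int) ∧ (j : Int) < b ∧ j < xs.length then some v else xs[j]? := by
  intro n
  induction n with
  | zero =>
    intro a b xs j ha hn
    have hba : b ≤ a := by omega
    rw [PySem.List.pyRange_one_eq_nil hba]
    simp only [List.foldl_nil]
    rw [if_neg]; omega
  | succ m ih =>
    intro a b xs j ha hn
    have hab : a < b := by omega
    rw [PySem.List.pyRange_one_cons hab]
    simp only [List.foldl_cons]
    rw [ih (a + 1) b (xs.set a.toNat v) j (by omega) (by omega)]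
    rw [List.length_set]
    by_cases hj : a + 1 ≤ (j : Int) ∧ (j : Int) < b ∧ j < xs.length
    · rw [if_pos hj, if_pos (by omega)]
    · rw [if_neg hj]
      rw [List.getElem?_set]
      by_cases hja : a.toNat = j
      · rw [if_pos hja]
        by_cases hjl : a.toNat < xs.length
        · rw [if_pos hjl, if_pos ⟨by omega, by omega, by omega⟩]
        · rw [if_neg hjl, if_neg (by omega), List.getElem?_eq_none (by omega)]
      · rw [if_neg hja, if_neg (by omega)]

-- Characterization of A's result on nonempty input.
theorem A_eq_replicate (labels : List Int) (h : labels ≠ []) :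
    normalize_process_labels labels =
      List.replicate (labels.findIdx (fun l => l == -1)) 1 ++
      List.replicate (labels.length - labels.findIdx (fun l => l == -1)) (-1) := by
  unfold normalize_process_labels
  rw [if_neg h]
  have hfp := firstpos_eq_findIdx labels 0
  simp only [zero_add] at hfp
  set p : Nat := labels.findIdx (fun l => l == -1) with hp
  have hple : p ≤ labels.length := List.findIdx_le_length
  simp only [hfp]
  have hlen1 : ((PySem.List.pyRange 0 (p : Int) 1).foldl
      (fun acc i => acc.set i.toNat 1) labels).length = labels.length :=
    fill_length 1 _ labels
  rw [hlen1]
  apply List.ext_getElem?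
  intro j
  rw [fill_getElem? (-1) ((labels.length : Int) - p).toNat p labels.length _ j (by omega) rfl]
  rw [hlen1]
  rw [fill_getElem? 1 p 0 (p : Int) labels j (by omega) (by omega)]
  by_cases h1 : j < p
  · rw [if_neg (by omega), if_pos (by constructor <;> omega)]
    rw [List.getElem?_append_left (by simpa using h1)]
    rw [List.getElem?_replicate, if_pos (by simpa using h1)]
  · by_cases h2 : j < labels.length
    · rw [if_pos (by refine ⟨by omega, by omega, by omega⟩)]
      rw [List.getElem?_append_right (by simp; omega)]
      rw [List.getElem?_replicate, if_pos (by simp; omega)]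
    · rw [if_neg (by omega), if_neg (by omega)]
      rw [List.getElem?_eq_none (by simpa using h2),
          List.getElem?_eq_none (by simp; omega)]

-- B's loop after the flag is set appends only -1s.
theorem B_true (labels : List Int) : ∀ (acc : List Int),
    (labels.foldl
      (fun (st : Bool × List Int) label =>
        if st.1 || label = -1 then (true, st.2 ++ [-1]) else (st.1, st.2 ++ [1]))
      (true, acc)).2 = acc ++ List.replicate labels.length (-1) := by
  induction labels with
  | nil => intro acc; simp
  | cons l ls ih =>
    intro acc
    simp only [List.foldl_cons, Bool.true_or, if_pos]
    rw [ih (acc ++ [-1])]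
    simp [List.replicate_succ, List.append_assoc]

-- B's loop before the flag is set: 1s up to the first -1, then -1s.
theorem B_false (labels : List Int) : ∀ (acc : List Int),
    (labels.foldl
      (fun (st : Bool × List Int) label =>
        if st.1 || label = -1 then (true, st.2 ++ [-1]) else (st.1, st.2 ++ [1]))
      (false, acc)).2 =
      acc ++ List.replicate (labels.findIdx (fun l => l == -1)) 1 ++
        List.replicate (labels.length - labels.findIdx (fun l => l == -1)) (-1) := by
  induction labels with
  | nil => intro acc; simp
  | cons l ls ih =>
    intro acc
    by_cases h : l = -1
    · simp only [List.foldl_cons, h, Bool.false_or, decide_true, if_pos]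
      rw [B_true ls (acc ++ [-1])]
      simp [List.findIdx_cons, List.replicate_succ, List.append_assoc]
    · simp only [List.foldl_cons, Bool.false_or, decide_eq_true_eq, h, if_false]
      rw [ih (acc ++ [1])]
      have hb : (l == -1) = false := by simp [h]
      have : (l :: ls).findIdx (fun l => l == -1) = ls.findIdx (fun l => l == -1) + 1 := by
        simp [List.findIdx_cons, hb]
      rw [this]
      simp [List.replicate_succ, List.append_assoc, List.length_cons]

theorem B_eq_replicate (labels : List Int) :
    normalize_process_labels_alt labels =
      List.replicate (labels.findIdx (fun l => l == -1)) 1 ++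
      List.replicate (labels.length - labels.findIdx (fun l => l == -1)) (-1) := by
  unfold normalize_process_labels_alt
  rw [B_false labels []]
  simp

-- ===== VERDICT (by name: the statement is the Claim_ definition above) =====
theorem normalize_process_labels_spec : Claim_equal_normalize_process_labels := by
  intro labels _
  unfold Spec_normalize_process_labels
  by_cases h : labels = []
  · subst h; rfl
  · rw [A_eq_replicate labels h, B_eq_replicate labels]
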